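-- pv_equiv track=rewrite | github.com/sudomakethis/PEL_gradient_version | Phase02.py | search_directions
-- ===== SOURCE A (Python) =====
-- def search_directions(nbr):
--     combinations = []
--     weights = []
--     for i in range(len(nbr)):
--         for j in range(i + 1, len(nbr)):
--             combinations.append((nbr[i], nbr[j]))
--     for couple in combinations:
--         weight = (abs(sum(dir[0] for dir in couple)) +
--                   abs(sum(dir[1] for dir in couple)))
--         weights.append(weight)
--     return combinations, weights
-- ===== SOURCE B (Python) =====
-- def search_directions(nbr):
--     combinations = []
--     weights = []
--     rest = list(nbr)
--     while rest:
--         a = rest.pop(0)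
--         for b in rest:
--             combinations.append((a, b))
--             weights.append(abs(a[0] + b[0]) + abs(a[1] + b[1]))
--     return combinations, weights
-- ===== Notes on version B (the rewrite author's own statement) =====
-- stated objective: simpler
-- what changed: B replaces A's index-based double pass (build all index pairs, then a second full pass recomputing each weight with generator sums) by a single fused head-and-rest traversal: it pops the first element, pairs it with every remaining element and computes the weight inline, so there is no index arithmetic and no second pass over the pair list.
import Mathlib
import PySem

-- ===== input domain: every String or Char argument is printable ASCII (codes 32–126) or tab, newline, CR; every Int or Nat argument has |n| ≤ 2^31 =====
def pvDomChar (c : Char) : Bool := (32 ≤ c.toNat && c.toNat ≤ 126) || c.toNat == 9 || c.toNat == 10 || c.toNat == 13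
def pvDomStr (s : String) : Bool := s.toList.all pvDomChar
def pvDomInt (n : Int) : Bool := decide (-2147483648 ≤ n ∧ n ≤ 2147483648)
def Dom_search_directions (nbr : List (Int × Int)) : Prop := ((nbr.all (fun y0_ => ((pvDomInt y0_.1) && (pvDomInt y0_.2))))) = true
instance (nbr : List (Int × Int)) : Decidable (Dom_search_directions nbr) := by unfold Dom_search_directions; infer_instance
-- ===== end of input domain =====

-- B fuses A's two quadratic passes into one head-and-rest traversal computing each weight inline (objective: simpler).

-- ===== PORT A =====
-- A: build all (nbr[i], nbr[j]) index pairs, then a second pass computing each weight.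
def search_directions (nbr : List (Int × Int)) : (List ((Int × Int) × (Int × Int))) × List Int :=
  let combinations :=
    (PySem.List.pyRange 0 (nbr.length : Int) 1).foldl (fun acc i =>
      (PySem.List.pyRange (i + 1) (nbr.length : Int) 1).foldl (fun acc2 j =>
        acc2 ++ [(PySem.List.pyGetD nbr i (0, 0), PySem.List.pyGetD nbr j (0, 0))]) acc) []
  let weights :=
    combinations.foldl (fun ws c =>
      ws ++ [|c.1.1 + c.2.1| + |c.1.2 + c.2.2|]) []
  (combinations, weights)

-- ===== PORT B =====
-- B: pop the head, pair it with each remaining element and emit the weight inline.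
def searchDirGo : List (Int × Int) → List ((Int × Int) × (Int × Int)) → List Int →
    (List ((Int × Int) × (Int × Int))) × List Int
  | [], cs, ws => (cs, ws)
  | a :: rest, cs, ws =>
      searchDirGo rest
        (rest.foldl (fun c b => c ++ [(a, b)]) cs)
        (rest.foldl (fun w b => w ++ [|a.1 + b.1| + |a.2 + b.2|]) ws)

def search_directions_alt (nbr : List (Int × Int)) : (List ((Int × Int) × (Int × Int))) × List Int :=
  searchDirGo nbr [] []

-- ===== PRECONDITION & SPEC =====
def Spec_search_directions (nbr : List (Int × Int)) (out : (List ((Int × Int) × (Int × Int))) × List Int) : Prop := out = search_directions_alt nbr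
instance (nbr : List (Int × Int)) (out : (List ((Int × Int) × (Int × Int))) × List Int) : Decidable (Spec_search_directions nbr out) := by unfold Spec_search_directions; infer_instance

-- ===== CLAIM (what is proved, stated in full; the proofs are below) =====
def Claim_equal_search_directions : Prop := ∀ (nbr : List (Int × Int)), Dom_search_directions nbr → Spec_search_directions nbr (search_directions nbr)

-- ===== LEMMAS AND PROOFS =====

/-- All ordered pairs (earlier element, later element), in A's and B's common emission order. -/
def pairsOf : List (Int × Int) → List ((Int × Int) × (Int × Int))
  | [] => []
  | a :: rest => rest.map (fun b => (a, b)) ++ pairsOf rest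

def wt (c : (Int × Int) × (Int × Int)) : Int := |c.1.1 + c.2.1| + |c.1.2 + c.2.2|

lemma searchDirGo_eq (l : List (Int × Int)) : ∀ cs ws,
    searchDirGo l cs ws = (cs ++ pairsOf l, ws ++ (pairsOf l).map wt) := by
  induction l with
  | nil => intro cs ws; simp [searchDirGo, pairsOf]
  | cons a rest ih =>
      intro cs ws
      simp only [searchDirGo, pairsOf,
        PySem.List.foldl_append_singleton_eq_map, ih, List.map_append, List.map_map,
        List.append_assoc]
      rfl

lemma outer_foldl_eq (nbr : List (Int × Int)) : ∀ m, ∀ k acc, nbr.length - k ≤ m →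
    (PySem.List.pyRange (k : Int) (nbr.length : Int) 1).foldl (fun acc i =>
      (PySem.List.pyRange (i + 1) (nbr.length : Int) 1).foldl (fun acc2 j =>
        acc2 ++ [(PySem.List.pyGetD nbr i (0, 0), PySem.List.pyGetD nbr j (0, 0))]) acc) acc
    = acc ++ pairsOf (nbr.drop k) := by
  intro m
  induction m with
  | zero =>
      intro k acc h
      have hk : nbr.length ≤ k := by omega
      rw [PySem.List.pyRange_one_eq_nil (by exact_mod_cast hk),
        List.drop_eq_nil_of_le hk]
      simp [pairsOf]
  | succ m ih =>
      intro k acc h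
      by_cases hk : nbr.length ≤ k
      · rw [PySem.List.pyRange_one_eq_nil (by exact_mod_cast hk),
          List.drop_eq_nil_of_le hk]
        simp [pairsOf]
      · have hk' : k < nbr.length := by omega
        rw [PySem.List.pyRange_one_cons (by exact_mod_cast hk')]
        simp only [List.foldl_cons]
        have hinner : ∀ (acc0 : List ((Int × Int) × (Int × Int))),
            (PySem.List.pyRange ((k : Int) + 1) (nbr.length : Int) 1).foldl (fun acc2 j =>
              acc2 ++ [(PySem.List.pyGetD nbr (k : Int) (0, 0), PySem.List.pyGetD nbr j (0, 0))]) acc0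
            = acc0 ++ (nbr.drop (k + 1)).map
                (fun b => (PySem.List.pyGetD nbr (k : Int) (0, 0), b)) := by
          intro acc0
          rw [PySem.List.foldl_pyRange_pyGetD' nbr (0, 0)
            (fun acc2 b => acc2 ++ [(PySem.List.pyGetD nbr (k : Int) (0, 0), b)]) acc0
            (a := (k : Int) + 1) (by omega),
            PySem.List.foldl_append_singleton_eq_map]
          norm_num [Int.toNat_natCast]
        rw [hinner]
        have hcast : (k : Int) + 1 = ((k + 1 : Nat) : Int) := by push_cast; ring
        rw [hcast, ih (k + 1) _ (by omega)]
        have hdrop : nbr.drop k = nbr[k] :: nbr.drop (k + 1) :=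
          List.drop_eq_getElem_cons hk'
        have hget : PySem.List.pyGetD nbr (k : Int) (0, 0) = nbr[k] := by
          rw [PySem.List.pyGetD_natCast, List.getD_eq_getElem _ _ hk']
        rw [hdrop]
        simp [pairsOf, hget, List.append_assoc]

lemma search_directions_eq (nbr : List (Int × Int)) :
    search_directions nbr = (pairsOf nbr, (pairsOf nbr).map wt) := by
  have hcomb :
      (PySem.List.pyRange 0 (nbr.length : Int) 1).foldl (fun acc i =>
        (PySem.List.pyRange (i + 1) (nbr.length : Int) 1).foldl (fun acc2 j =>
          acc2 ++ [(PySem.List.pyGetD nbr i (0, 0), PySem.List.pyGetD nbr j (0, 0))]) acc) []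
      = pairsOf nbr := by
    have := outer_foldl_eq nbr nbr.length 0 [] (by omega)
    simpa using this
  have hw : ∀ cl : List ((Int × Int) × (Int × Int)),
      cl.foldl (fun ws c => ws ++ [|c.1.1 + c.2.1| + |c.1.2 + c.2.2|]) [] = cl.map wt := by
    intro cl
    simpa [wt] using
      PySem.List.foldl_append_singleton_eq_map (f := wt) (acc := ([] : List Int)) (l := cl)
  unfold search_directions
  simp only [hcomb, hw]

-- ===== VERDICT (by name: the statement is the Claim_ definition above) =====
theorem search_directions_spec : Claim_equal_search_directions := by
  intro nbr _
  unfold Spec_search_directions search_directions_alt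
  rw [search_directions_eq, searchDirGo_eq]
  simp
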